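-- pv_equiv track=rewrite | github.com/CaioMerz/dashboard-economico | utils/kpis.py | _escolher_coluna_data
-- ===== SOURCE A (Python) =====
-- import unicodedata
--
-- def _escolher_coluna_data(colunas: list[str]) -> str | None:
--     for coluna in colunas:
--         nome = _normalizar(coluna)
--         if nome in {"data", "date", "mes", "periodo", "timestamp"}:
--             return coluna
--     for coluna in colunas:
--         nome = _normalizar(coluna)
--         if "data" in nome or "date" in nome or "periodo" in nome:
--             return coluna
--     return None
--
-- def _normalizar(texto: object) -> str:
--     texto_limpo = str(texto or "").strip().lower()
--     sem_acentos = unicodedata.normalize("NFKD", texto_limpo).encode("ascii", "ignore").decode("ascii")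
--     return sem_acentos
-- ===== SOURCE B (Python) =====
-- import unicodedata
--
-- def _escolher_coluna_data(colunas):
--     exato = None
--     parcial = None
--     for coluna in colunas:
--         nome = _normalizar_b(coluna)
--         if exato is None and nome in {"data", "date", "mes", "periodo", "timestamp"}:
--             exato = coluna
--         if parcial is None and ("data" in nome or "date" in nome or "periodo" in nome):
--             parcial = coluna
--     return exato if exato is not None else parcial
--
-- def _normalizar_b(texto):
--     texto_limpo = str(texto or "").strip().lower()
--     return unicodedata.normalize("NFKD", texto_limpo).encode("ascii", "ignore").decode("ascii")
-- ===== Notes on version B (the rewrite author's own statement) =====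
-- stated objective: alternative
-- what changed: Replaces A's two full scans (exact pass, then substring pass) with a single pass that maintains first-found 'exato' and 'parcial' candidates and picks exato over parcial at the end.
import Mathlib
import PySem

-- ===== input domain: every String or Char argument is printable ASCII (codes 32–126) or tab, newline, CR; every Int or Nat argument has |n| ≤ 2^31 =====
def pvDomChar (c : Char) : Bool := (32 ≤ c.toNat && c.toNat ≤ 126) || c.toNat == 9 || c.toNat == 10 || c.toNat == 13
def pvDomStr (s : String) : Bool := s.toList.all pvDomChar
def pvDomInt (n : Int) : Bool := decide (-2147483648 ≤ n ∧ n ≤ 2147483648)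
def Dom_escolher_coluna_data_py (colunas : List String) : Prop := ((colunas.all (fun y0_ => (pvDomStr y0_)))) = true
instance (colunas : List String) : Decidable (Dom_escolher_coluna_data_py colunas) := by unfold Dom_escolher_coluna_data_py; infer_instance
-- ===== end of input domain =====

-- B replaces A's two full scans (exact pass, then substring pass) by one pass keeping
-- first-found exact and partial candidates; same O(n) cost, different decomposition.

-- ===== PORT A =====
-- _normalizar: str(texto or "").strip().lower(), then NFKD + ascii-ignore.
-- On the printable-ASCII domain the NFKD/encode/decode step is the identity, so the
-- port is strip + lower (exact on Dom).
def pvNormalizar (s : String) : String := PySem.Str.lower (PySem.Str.strip s)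

def pvExato (nome : String) : Bool :=
  nome == "data" || nome == "date" || nome == "mes" || nome == "periodo" || nome == "timestamp"

def pvParcial (nome : String) : Bool :=
  PySem.Str.isIn "data" nome || PySem.Str.isIn "date" nome || PySem.Str.isIn "periodo" nome

-- first loop: return the first column whose normalized name is in the exact set;
-- second loop: return the first column whose normalized name contains a date-like word.
def escolher_coluna_data_py (colunas : List String) : Option String :=
  match colunas.find? (fun coluna => pvExato (pvNormalizar coluna)) with
  | some coluna => some coluna
  | none => colunas.find? (fun coluna => pvParcial (pvNormalizar coluna))

-- ===== PORT B =====
-- one pass: maintain (exato, parcial), each set only while still none; return exato else parcial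
def pvStep (acc : Option String × Option String) (coluna : String) :
    Option String × Option String :=
  let nome := pvNormalizar coluna
  let acc1 := if acc.1.isNone && pvExato nome then (some coluna, acc.2) else acc
  if acc1.2.isNone && pvParcial nome then (acc1.1, some coluna) else acc1

def escolher_coluna_data_py_alt (colunas : List String) : Option String :=
  let r := colunas.foldl pvStep (none, none)
  match r.1 with
  | some c => some c
  | none => r.2

-- ===== PRECONDITION & SPEC =====
def Spec_escolher_coluna_data_py (colunas : List String) (out : Option String) : Prop := out = escolher_coluna_data_py_alt colunas
instance (colunas : List String) (out : Option String) : Decidable (Spec_escolher_coluna_data_py colunas out) := by unfold Spec_escolher_coluna_data_py; infer_instance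

-- ===== CLAIM (what is proved, stated in full; the proofs are below) =====
def Claim_equal_escolher_coluna_data_py : Prop := ∀ (colunas : List String), Dom_escolher_coluna_data_py colunas → Spec_escolher_coluna_data_py colunas (escolher_coluna_data_py colunas)

-- ===== LEMMAS AND PROOFS =====

-- pvStep componentwise: each candidate is updated independently
theorem pvStep_eq (e p : Option String) (c : String) :
    pvStep (e, p) c =
      ((if e.isNone && pvExato (pvNormalizar c) then some c else e),
       (if p.isNone && pvParcial (pvNormalizar c) then some c else p)) := by
  unfold pvStep
  cases e <;> cases p <;>
    cases hE : pvExato (pvNormalizar c) <;> cases hP : pvParcial (pvNormalizar c) <;>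
    simp [hE, hP]

-- the fold's invariant: each component is the old candidate if set, else the first match in the rest
theorem pvFold_eq (colunas : List String) (e p : Option String) :
    colunas.foldl pvStep (e, p) =
      (e.or (colunas.find? (fun c => pvExato (pvNormalizar c))),
       p.or (colunas.find? (fun c => pvParcial (pvNormalizar c)))) := by
  induction colunas generalizing e p with
  | nil => simp
  | cons c cs ih =>
    rw [List.foldl_cons, pvStep_eq, ih]
    cases e <;> cases p <;>
      cases hE : pvExato (pvNormalizar c) <;> cases hP : pvParcial (pvNormalizar c) <;>
      simp [hE, hP, Option.or]

theorem escolher_coluna_data_py_eq (colunas : List String) :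
    escolher_coluna_data_py colunas = escolher_coluna_data_py_alt colunas := by
  unfold escolher_coluna_data_py escolher_coluna_data_py_alt
  rw [pvFold_eq]
  cases colunas.find? (fun c => pvExato (pvNormalizar c)) <;> rfl

-- ===== VERDICT (by name: the statement is the Claim_ definition above) =====
theorem escolher_coluna_data_py_spec : Claim_equal_escolher_coluna_data_py := by
  intro colunas _
  unfold Spec_escolher_coluna_data_py
  exact escolher_coluna_data_py_eq colunas
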